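-- pv_equiv track=rewrite | github.com/krysros/Marker | marker/utils/website_autofill.py | _is_company_case_token
-- ===== SOURCE A (Python) =====
-- def _is_company_case_token(token):
--     for part in token.split("-"):
--         letters = [char for char in part if char.isalpha()]
--         if not letters:
--             continue
--
--         if all(char.isupper() for char in letters):
--             continue
--
--         first_alpha_index = next(
--             (index for index, char in enumerate(part) if char.isalpha()),
--             -1,
--         )
--         if first_alpha_index < 0 or not part[first_alpha_index].isupper():
--             return False
--
--         tail = part[first_alpha_index + 1 :]
--         if any(char.isalpha() and not char.islower() for char in tail):
--             return False
--
--     return True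
-- ===== SOURCE B (Python) =====
-- def _is_company_case_token(token):
--     saw_letter = False
--     first_upper = False
--     tail_upper = False
--     tail_lower = False
--     for ch in token:
--         if ch == "-":
--             if saw_letter and (not first_upper or (tail_upper and tail_lower)):
--                 return False
--             saw_letter = False
--             first_upper = False
--             tail_upper = False
--             tail_lower = False
--         elif ch.isalpha():
--             if saw_letter:
--                 if ch.isupper():
--                     tail_upper = True
--                 if ch.islower():
--                     tail_lower = True
--             else:
--                 saw_letter = True
--                 first_upper = ch.isupper()
--     return not (saw_letter and (not first_upper or (tail_upper and tail_lower)))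
-- ===== Notes on version B (the rewrite author's own statement) =====
-- stated objective: alternative
-- what changed: Replaces A's hyphen-split followed by three scans per part (letters filter, all-upper check, enumerate+slice rescan) with a single left-to-right pass over the token that keeps four per-part flags (saw_letter, first_upper, tail_upper, tail_lower) and finalizes them at every separator and at the end.
import Mathlib
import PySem

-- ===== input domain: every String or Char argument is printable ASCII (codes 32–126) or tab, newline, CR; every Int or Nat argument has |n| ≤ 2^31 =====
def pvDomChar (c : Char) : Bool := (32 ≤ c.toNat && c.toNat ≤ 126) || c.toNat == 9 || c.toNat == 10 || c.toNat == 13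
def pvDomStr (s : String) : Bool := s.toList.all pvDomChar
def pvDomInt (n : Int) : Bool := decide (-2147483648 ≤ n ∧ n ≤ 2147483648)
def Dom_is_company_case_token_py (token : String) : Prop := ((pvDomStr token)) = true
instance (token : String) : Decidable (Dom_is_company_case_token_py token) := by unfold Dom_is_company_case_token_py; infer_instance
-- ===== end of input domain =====

-- B replaces A's split-then-rescan (three scans per part) by a single left-to-right pass
-- over the token with four per-part flags, reset at every hyphen separator (objective: alternative decomposition).

-- ===== PORT A =====
-- next((index for index, char in enumerate(part) if char.isalpha()), -1)
def pvFirstAlphaIdx (part : List Char) : Int :=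
  match (PySem.List.enumerate part).find? (fun q => PySem.Chars.isalpha q.2) with
  | some q => q.1
  | none => -1

-- loop body of A for one part of token.split("-"): True means 'continue'
def pvPartA (part : List Char) : Bool :=
  let letters := part.filter (fun c => PySem.Chars.isalpha c)
  if letters.isEmpty then true
  else if letters.all (fun c => PySem.Chars.isupper c) then true
  else
    let first_alpha_index := pvFirstAlphaIdx part
    if first_alpha_index < 0 then false
    else
      match PySem.List.pyGet? part first_alpha_index with
      | none => false   -- IndexError: unreachable, the index came from enumerate(part)
      | some ch =>
        if !PySem.Chars.isupper ch then false
        else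
          let tail := PySem.List.slice part (some (first_alpha_index + 1)) none
          if tail.any (fun c => PySem.Chars.isalpha c && !PySem.Chars.islower c) then false
          else true

-- A's for-loop with its early 'return False'
def pvLoopA : List (List Char) → Bool
  | [] => true
  | part :: rest => if pvPartA part then pvLoopA rest else false

def is_company_case_token_py (token : String) : Bool :=
  pvLoopA (PySem.Chars.splitOn token.toList ['-'])

-- ===== PORT B =====
-- B's per-character state: (saw_letter, first_upper, tail_upper, tail_lower)
def pvLoopB : List Char → Bool → Bool → Bool → Bool → Bool
  | [], saw, fu, tu, tl => !(saw && (!fu || (tu && tl)))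
  | c :: cs, saw, fu, tu, tl =>
      if c = '-' then
        if saw && (!fu || (tu && tl)) then false
        else pvLoopB cs false false false false
      else if PySem.Chars.isalpha c then
        if saw then
          pvLoopB cs saw fu (tu || PySem.Chars.isupper c) (tl || PySem.Chars.islower c)
        else
          pvLoopB cs true (PySem.Chars.isupper c) tu tl
      else pvLoopB cs saw fu tu tl

def is_company_case_token_py_alt (token : String) : Bool :=
  pvLoopB token.toList false false false false

-- ===== PRECONDITION & SPEC =====
def Spec_is_company_case_token_py (token : String) (out : Bool) : Prop := out = is_company_case_token_py_alt token
instance (token : String) (out : Bool) : Decidable (Spec_is_company_case_token_py token out) := by unfold Spec_is_company_case_token_py; infer_instance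

-- ===== CLAIM (what is proved, stated in full; the proofs are below) =====
def Claim_equal_is_company_case_token_py : Prop := ∀ (token : String), Dom_is_company_case_token_py token → Spec_is_company_case_token_py token (is_company_case_token_py token)

-- ===== LEMMAS AND PROOFS =====

-- reference split of A's token.split("-")
def pvSplit : List Char → List (List Char)
  | [] => [[]]
  | c :: cs =>
      if c = '-' then [] :: pvSplit cs
      else (c :: (pvSplit cs).headI) :: (pvSplit cs).tail

theorem pvSplit_ne_nil (l : List Char) : pvSplit l ≠ [] := by
  cases l with
  | nil => simp [pvSplit]
  | cons c cs => simp only [pvSplit]; split <;> simp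

theorem pvSplit_eq_cons (l : List Char) : pvSplit l = (pvSplit l).headI :: (pvSplit l).tail := by
  rcases h : pvSplit l with _ | ⟨a, t⟩
  · exact absurd h (pvSplit_ne_nil l)
  · simp

theorem pv_go_eq (fuel : Nat) (l cur : List Char) (acc : List (List Char))
    (h : l.length < fuel) :
    PySem.Chars.splitOn.go ['-'] fuel l cur acc
      = acc.reverse ++ (cur.reverse ++ (pvSplit l).headI) :: (pvSplit l).tail := by
  induction fuel generalizing l cur acc with
  | zero => omega
  | succ fuel ih =>
    cases l with
    | nil => simp [PySem.Chars.splitOn.go, pvSplit]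
    | cons c cs =>
      simp only [PySem.Chars.splitOn.go]
      by_cases hc : c = '-'
      · subst hc
        rw [if_pos (by simp [List.isPrefixOf])]
        have hd : List.drop (['-'] : List Char).length ('-' :: cs) = cs := rfl
        rw [hd, ih cs [] (cur.reverse :: acc) (by simp at h ⊢; omega)]
        simp only [pvSplit]
        rw [pvSplit_eq_cons cs]
        simp
      · rw [if_neg (by simp [List.isPrefixOf]; exact fun hh => hc hh.symm)]
        rw [ih cs (c :: cur) acc (by simp at h ⊢; omega)]
        simp [pvSplit, hc]

theorem pv_splitOn_eq (l : List Char) :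
    PySem.Chars.splitOn l ['-'] = pvSplit l := by
  unfold PySem.Chars.splitOn
  rw [pv_go_eq (l.length + 1) l [] [] (by omega)]
  simpa using (pvSplit_eq_cons l).symm

-- characters: alpha = upper or lower, and never both
theorem pv_alpha_iff (c : Char) :
    PySem.Chars.isalpha c = (PySem.Chars.isupper c || PySem.Chars.islower c) := rfl

theorem pv_up_not_low (c : Char) (h : PySem.Chars.isupper c = true) :
    PySem.Chars.islower c = false := by
  simp only [PySem.Chars.isupper, Bool.and_eq_true, decide_eq_true_eq] at h
  by_contra hl
  simp only [PySem.Chars.islower, Bool.not_eq_false, Bool.and_eq_true, decide_eq_true_eq] at hl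
  exact absurd (le_trans hl.1 h.2) (by decide)

-- the canonical per-part verdict, on the part's list of letters
def pvOk : List Char → Bool
  | [] => true
  | c :: r => PySem.Chars.isupper c && !(r.any (fun d => PySem.Chars.isupper d) && r.any (fun d => PySem.Chars.islower d))

-- B's fold step, as pvLoopB performs it on a non-'-' character
def pvStep : (Bool × Bool × Bool × Bool) → Char → (Bool × Bool × Bool × Bool)
  | (saw, fu, tu, tl), c =>
      if PySem.Chars.isalpha c then
        if saw then (saw, fu, tu || PySem.Chars.isupper c, tl || PySem.Chars.islower c)
        else (true, PySem.Chars.isupper c, tu, tl)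
      else (saw, fu, tu, tl)

def pvFin : (Bool × Bool × Bool × Bool) → Bool
  | (saw, fu, tu, tl) => !(saw && (!fu || (tu && tl)))

theorem pv_foldl_step_saw (p : List Char) (fu tu tl : Bool) :
    p.foldl pvStep (true, fu, tu, tl)
      = (true, fu, tu || (p.filter (fun c => PySem.Chars.isalpha c)).any (fun d => PySem.Chars.isupper d),
                   tl || (p.filter (fun c => PySem.Chars.isalpha c)).any (fun d => PySem.Chars.islower d)) := by
  induction p generalizing tu tl with
  | nil => simp
  | cons c p ih =>
    by_cases hc : PySem.Chars.isalpha c = true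
    · simp [pvStep, hc, ih, Bool.or_assoc]
    · simp [pvStep, hc, ih]

theorem pv_foldl_step_init (p : List Char) :
    p.foldl pvStep (false, false, false, false)
      = match p.filter (fun c => PySem.Chars.isalpha c) with
        | [] => (false, false, false, false)
        | c :: r => (true, PySem.Chars.isupper c, r.any (fun d => PySem.Chars.isupper d), r.any (fun d => PySem.Chars.islower d)) := by
  induction p with
  | nil => simp
  | cons c p ih =>
    by_cases hc : PySem.Chars.isalpha c = true
    · simp [pvStep, hc, pv_foldl_step_saw]
    · simp [pvStep, hc, ih]

theorem pv_fin_init (p : List Char) :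
    pvFin (p.foldl pvStep (false, false, false, false))
      = pvOk (p.filter (fun c => PySem.Chars.isalpha c)) := by
  rw [pv_foldl_step_init]
  rcases h : p.filter (fun c => PySem.Chars.isalpha c) with _ | ⟨c, r⟩
  · simp [pvFin, pvOk]
  · simp only [pvFin, pvOk]
    rcases PySem.Chars.isupper c <;> simp

-- pvLoopB runs B's part-by-part check
theorem pv_loopB_eq (cs : List Char) (saw fu tu tl : Bool) :
    pvLoopB cs saw fu tu tl
      = (pvFin (((pvSplit cs).headI).foldl pvStep (saw, fu, tu, tl))
          && ((pvSplit cs).tail).all (fun p => pvFin (p.foldl pvStep (false, false, false, false)))) := by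
  induction cs generalizing saw fu tu tl with
  | nil => simp [pvLoopB, pvSplit, pvFin]
  | cons c cs ih =>
    by_cases hc : c = '-'
    · subst hc
      simp only [pvLoopB, pvSplit]
      by_cases hf : (saw && (!fu || (tu && tl))) = true
      · simp [hf, pvFin]
      · rw [if_neg hf, ih]
        rw [pvSplit_eq_cons cs]
        simp only [List.headI, List.tail]
        have h0 : (saw && (!fu || (tu && tl))) = false := eq_false_of_ne_true hf
        simp [pvFin, h0]
    · have hstep : pvLoopB (c :: cs) saw fu tu tl = pvLoopB cs ((pvStep (saw, fu, tu, tl) c).1)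
          ((pvStep (saw, fu, tu, tl) c).2.1) ((pvStep (saw, fu, tu, tl) c).2.2.1) ((pvStep (saw, fu, tu, tl) c).2.2.2) := by
        simp only [pvLoopB, if_neg hc, pvStep]
        by_cases ha : PySem.Chars.isalpha c = true
        · by_cases hs : saw = true <;> simp [ha, hs]
        · simp [ha]
      rw [hstep, ih]
      simp [pvSplit, hc]

-- find over enumerate yields the first matching index and its element
theorem pv_find_enumerate (p : List Char) (s : Int) (f : Char → Bool) :
    (PySem.List.enumerate p s).find? (fun q => f q.2)
      = (p.findIdx? f).map (fun (j : Nat) => (((s + (j : Int)) : Int), p.getD j 'a')) := by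
  induction p generalizing s with
  | nil => simp [PySem.List.enumerate_nil]
  | cons c p ih =>
    rw [PySem.List.enumerate_cons, List.find?_cons]
    by_cases hc : f c = true
    · simp [hc, List.findIdx?_cons]
    · simp only [hc]
      rw [ih (s + 1), List.findIdx?_cons]
      simp only [hc, Bool.false_eq_true, if_false]
      cases hj : p.findIdx? f with
      | none => simp
      | some j =>
        simp only [Option.map_some]
        simp
        omega

theorem pv_findIdx?_none (p : List Char) (f : Char → Bool)
    (h : p.findIdx? f = none) : p.filter f = [] := by
  rw [List.filter_eq_nil_iff]
  intro a ha
  have := List.findIdx?_eq_none_iff.mp h a ha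
  simpa using this

theorem pv_findIdx?_some (p : List Char) (f : Char → Bool) (j : Nat)
    (h : p.findIdx? f = some j) :
    j < p.length ∧ f (p.getD j 'a') = true ∧
      p.filter f = p.getD j 'a' :: ((p.drop (j + 1)).filter f) := by
  induction p generalizing j with
  | nil => simp at h
  | cons c p ih =>
    rw [List.findIdx?_cons] at h
    by_cases hc : f c = true
    · rw [if_pos hc] at h
      simp at h
      subst h
      simp [hc]
    · rw [if_neg hc] at h
      rcases hj : p.findIdx? f with _ | j'
      · simp [hj] at h
      · rw [hj] at h
        simp at h
        obtain ⟨hl, hf, he⟩ := ih j' hj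
        subst h
        refine ⟨by simpa using Nat.succ_lt_succ hl, by simpa using hf, ?_⟩
        simp [hc, he]

theorem pv_any_congr {l : List Char} {f g : Char → Bool}
    (h : ∀ a ∈ l, f a = g a) : l.any f = l.any g := by
  induction l with
  | nil => rfl
  | cons a l ih =>
    simp only [List.any_cons, h a (by simp), ih (fun b hb => h b (by simp [hb]))]

-- A's per-part three-scan body computes pvOk of the part's letters
theorem pv_partA_eq (part : List Char) :
    pvPartA part = pvOk (part.filter (fun c => PySem.Chars.isalpha c)) := by
  unfold pvPartA pvFirstAlphaIdx
  rcases hidx : part.findIdx? (fun c => PySem.Chars.isalpha c) with _ | j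
  · -- no letter in the part
    rw [pv_findIdx?_none part _ hidx]
    simp [pvOk]
  · obtain ⟨hlen, halpha, hfil⟩ := pv_findIdx?_some part _ j hidx
    set ch := part.getD j 'a' with hch
    rw [hfil]
    simp only [List.isEmpty_cons, Bool.false_eq_true, if_false, List.all_cons]
    by_cases hall : (PySem.Chars.isupper ch && ((part.drop (j + 1)).filter (fun c => PySem.Chars.isalpha c)).all (fun c => PySem.Chars.isupper c)) = true
    · -- all letters upper: both continue / pvOk true
      rw [if_pos hall]
      simp only [Bool.and_eq_true] at hall
      obtain ⟨h1, h2⟩ := hall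
      have : ((part.drop (j + 1)).filter (fun c => PySem.Chars.isalpha c)).any (fun d => PySem.Chars.islower d) = false := by
        rw [List.any_eq_false]
        intro a ha
        have := (List.all_eq_true.mp h2) a ha
        simp [pv_up_not_low a this]
      simp [pvOk, h1, this]
    · rw [if_neg hall]
      rw [pv_find_enumerate part 0 (fun c => PySem.Chars.isalpha c), hidx]
      simp only [Option.map_some, zero_add]
      rw [if_neg (by omega)]
      have hget : PySem.List.pyGet? part ((j : Int)) = some ch := by
        rw [PySem.List.pyGet?_natCast part j]
        rw [List.getElem?_eq_getElem hlen]
        simp [hch, List.getD_eq_getElem?_getD, List.getElem?_eq_getElem hlen]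
      rw [hget]
      have hslice : PySem.List.slice part (some ((j : Int) + 1)) none = part.drop (j + 1) := by
        have h1 : ((j : Int) + 1) = ((j + 1 : Nat) : Int) := by push_cast; ring
        rw [h1, PySem.List.slice_from]
        · simp
        · exact Int.natCast_nonneg _
      rw [hslice]
      have hany : (part.drop (j + 1)).any (fun c => PySem.Chars.isalpha c && !PySem.Chars.islower c)
          = ((part.drop (j + 1)).filter (fun c => PySem.Chars.isalpha c)).any (fun d => PySem.Chars.isupper d) := by
        rw [List.any_filter]
        apply pv_any_congr
        intro a _
        rcases hu : PySem.Chars.isupper a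
        · rcases hl : PySem.Chars.islower a <;> simp [pv_alpha_iff, hu, hl]
        · simp [pv_alpha_iff, hu, pv_up_not_low a hu]
      by_cases hupch : PySem.Chars.isupper ch = true
      · simp only [hupch, Bool.not_true, Bool.false_eq_true, if_false]
        have hlow : ((part.drop (j + 1)).filter (fun c => PySem.Chars.isalpha c)).any (fun d => PySem.Chars.islower d) = true := by
          simp only [hupch, Bool.true_and] at hall
          rw [List.all_eq_not_any_not] at hall
          simp only [Bool.not_eq_true', Bool.not_eq_false] at hall
          rw [List.any_eq_true] at hall ⊢
          obtain ⟨a, ha, hna⟩ := hall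
          refine ⟨a, ha, ?_⟩
          have hmem := List.of_mem_filter ha
          have h2 := pv_alpha_iff a ▸ hmem
          simp only [Bool.not_eq_true'] at hna
          simpa [hna] using h2
        rcases hany2 : ((part.drop (j + 1)).filter (fun c => PySem.Chars.isalpha c)).any (fun d => PySem.Chars.isupper d)
        · simp [hany, hany2, pvOk, hupch, hlow]
        · simp [hany, hany2, pvOk, hupch, hlow]
      · simp only [Bool.not_eq_true] at hupch
        simp [hupch, pvOk]

theorem pv_loopA_all (ps : List (List Char)) :
    pvLoopA ps = ps.all (fun p => pvOk (p.filter (fun c => PySem.Chars.isalpha c))) := by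
  induction ps with
  | nil => simp [pvLoopA]
  | cons p ps ih =>
    simp only [pvLoopA, pv_partA_eq, ih, List.all_cons]
    rcases pvOk (p.filter (fun c => PySem.Chars.isalpha c)) <;> simp

-- ===== VERDICT (by name: the statement is the Claim_ definition above) =====
theorem is_company_case_token_py_spec : Claim_equal_is_company_case_token_py := by
  intro token _
  unfold Spec_is_company_case_token_py
  unfold is_company_case_token_py is_company_case_token_py_alt
  rw [pv_splitOn_eq, pv_loopA_all, pv_loopB_eq]
  have hall : ∀ (L : List (List Char)),
      L.all (fun p => pvOk (p.filter (fun c => PySem.Chars.isalpha c)))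
        = L.all (fun p => pvFin (p.foldl pvStep (false, false, false, false))) := by
    intro L
    induction L with
    | nil => rfl
    | cons a L ih => simp only [List.all_cons, ih, pv_fin_init]
  conv_lhs => rw [pvSplit_eq_cons token.toList]
  rw [List.all_cons, ← pv_fin_init ((pvSplit token.toList).headI), hall]
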